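-- pv_equiv track=rewrite | github.com/eguar11011/Codigos_convolucionales | streamlit_app.py | convolutional_encode
-- ===== SOURCE A (Python) =====
-- def convolutional_encode(bits, poly1="111", poly2="101"):
--     """
--     Codifica una secuencia de bits usando un código convolucional
--     de tasa 1/2, memoria = 2, polinomios en binario (string).
--     No se aplica flushing.
--     """
--     g1 = [int(b) for b in poly1]
--     g2 = [int(b) for b in poly2]
--     R1, R2 = 0, 0
--     output = []
--
--     for b in bits:
--         bit_actual = int(b)
--         y1 = (bit_actual * g1[0]) ^ (R1 * g1[1]) ^ (R2 * g1[2])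
--         y2 = (bit_actual * g2[0]) ^ (R1 * g2[1]) ^ (R2 * g2[2])
--         output.extend([str(y1), str(y2)])
--         R2 = R1
--         R1 = bit_actual
--
--     return "".join(output)
-- ===== SOURCE B (Python) =====
-- def convolutional_encode(bits, poly1="111", poly2="101"):
--     """Rate-1/2 convolutional encoding; index-lookback instead of shift registers."""
--     g1 = [int(b) for b in poly1]
--     g2 = [int(b) for b in poly2]
--     xs = [int(b) for b in bits]
--     out = []
--     for i in range(len(xs)):
--         c = xs[i]
--         p1 = xs[i - 1] if i >= 1 else 0
--         p2 = xs[i - 2] if i >= 2 else 0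
--         y1 = (c * g1[0]) ^ (p1 * g1[1]) ^ (p2 * g1[2])
--         y2 = (c * g2[0]) ^ (p1 * g2[1]) ^ (p2 * g2[2])
--         out.append(str(y1) + str(y2))
--     return "".join(out)
-- ===== Notes on version B (the rewrite author's own statement) =====
-- stated objective: alternative
-- what changed: Replaces the two running shift-register variables (R1, R2) carried across iterations by a stateless index loop that reads the current bit and the two previous bits back out of a precomputed digit list (with implicit zeros before the start).
import Mathlib
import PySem

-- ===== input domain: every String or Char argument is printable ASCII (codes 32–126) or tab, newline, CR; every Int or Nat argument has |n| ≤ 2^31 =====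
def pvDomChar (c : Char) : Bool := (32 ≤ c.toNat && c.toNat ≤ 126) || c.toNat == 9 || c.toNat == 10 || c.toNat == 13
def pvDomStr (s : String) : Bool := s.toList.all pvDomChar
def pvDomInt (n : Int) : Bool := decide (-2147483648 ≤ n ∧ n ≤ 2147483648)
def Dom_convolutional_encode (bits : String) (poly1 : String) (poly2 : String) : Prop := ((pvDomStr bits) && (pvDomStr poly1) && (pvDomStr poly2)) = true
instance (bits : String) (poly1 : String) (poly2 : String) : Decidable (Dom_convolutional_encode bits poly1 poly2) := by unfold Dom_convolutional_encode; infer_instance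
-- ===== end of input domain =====

-- B replaces A's two running shift-register variables by direct look-back indexing into the
-- digit list (xs[i-1]/xs[i-2] with zeros before the start); same output, alternative structure.

-- ===== PORT A =====
-- int(b) for a single character b; exact on digit characters (Pre_ admits only those)
def pvDig (c : Char) : Int := (PySem.Int.ofChars? [c]).getD 0

-- (bit*g[0]) ^ (R1*g[1]) ^ (R2*g[2]); g[k] via getD 0: Python raises IndexError on a
-- short polynomial with nonempty bits — excluded by Pre_
def pvOutBit (g : List Int) (c p1 p2 : Int) : Int :=
  PySem.Int.bxor (PySem.Int.bxor (c * g.getD 0 0) (p1 * g.getD 1 0)) (p2 * g.getD 2 0)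

-- A's loop body: state (R1, R2, output)
def pvStepA (g1 g2 : List Int) (st : Int × Int × List String) (b : Char) : Int × Int × List String :=
  let c := pvDig b
  (c, st.1, st.2.2 ++ [PySem.Int.toStr (pvOutBit g1 c st.1 st.2.1),
                       PySem.Int.toStr (pvOutBit g2 c st.1 st.2.1)])

def convolutional_encode (bits : String) (poly1 : String) (poly2 : String) : String :=
  let g1 := poly1.toList.map pvDig
  let g2 := poly2.toList.map pvDig
  let fin := bits.toList.foldl (pvStepA g1 g2) (0, 0, [])
  PySem.Str.join "" fin.2.2

-- ===== PORT B =====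
-- B's loop body: no state between iterations, the two previous bits are read back from xs
-- (i-1, i-2 are guarded by 1 ≤ i / 2 ≤ i, so Nat subtraction is exactly Python's)
def pvStepB (g1 g2 xs : List Int) (acc : List String) (i : Nat) : List String :=
  let c := xs.getD i 0
  let p1 := if 1 ≤ i then xs.getD (i - 1) 0 else 0
  let p2 := if 2 ≤ i then xs.getD (i - 2) 0 else 0
  acc ++ [PySem.Int.toStr (pvOutBit g1 c p1 p2) ++ PySem.Int.toStr (pvOutBit g2 c p1 p2)]

def convolutional_encode_alt (bits : String) (poly1 : String) (poly2 : String) : String :=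
  let g1 := poly1.toList.map pvDig
  let g2 := poly2.toList.map pvDig
  let xs := bits.toList.map pvDig
  let out := (List.range xs.length).foldl (pvStepB g1 g2 xs) []
  PySem.Str.join "" out

-- ===== PRECONDITION & SPEC =====
-- Pre_: every character int() is applied to must be a digit (else Python raises ValueError),
-- and when bits is nonempty both polynomials need length ≥ 3 (else g[1]/g[2] raise IndexError).
def Pre_convolutional_encode (bits : String) (poly1 : String) (poly2 : String) : Prop :=
  ((bits.toList ++ poly1.toList ++ poly2.toList).all (fun c => decide ('0' ≤ c) && decide (c ≤ '9'))) = true ∧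
  (bits.toList ≠ [] → 3 ≤ poly1.toList.length ∧ 3 ≤ poly2.toList.length)

instance (bits : String) (poly1 : String) (poly2 : String) : Decidable (Pre_convolutional_encode bits poly1 poly2) := by
  unfold Pre_convolutional_encode; infer_instance

def pvWitness_convolutional_encode : String × String × String := ("1011", "111", "101")

def Spec_convolutional_encode (bits : String) (poly1 : String) (poly2 : String) (out : String) : Prop := out = convolutional_encode_alt bits poly1 poly2
instance (bits : String) (poly1 : String) (poly2 : String) (out : String) : Decidable (Spec_convolutional_encode bits poly1 poly2 out) := by unfold Spec_convolutional_encode; infer_instance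

-- ===== CLAIM (what is proved, stated in full; the proofs are below) =====
def Claim_equal_convolutional_encode : Prop := ∀ (bits : String) (poly1 : String) (poly2 : String), Dom_convolutional_encode bits poly1 poly2 → Pre_convolutional_encode bits poly1 poly2 → Spec_convolutional_encode bits poly1 poly2 (convolutional_encode bits poly1 poly2)

-- ===== LEMMAS AND PROOFS =====

-- the per-step output pairs, A-style (two strings per input bit), over the converted bit list
def pvPairsA (g1 g2 : List Int) : Int → Int → List Int → List String
  | _, _, [] => []
  | p1, p2, c :: rest =>
      PySem.Int.toStr (pvOutBit g1 c p1 p2) :: PySem.Int.toStr (pvOutBit g2 c p1 p2) ::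
        pvPairsA g1 g2 c p1 rest

-- the per-step output, B-style (one concatenated string per input bit)
def pvPairsB (g1 g2 : List Int) : Int → Int → List Int → List String
  | _, _, [] => []
  | p1, p2, c :: rest =>
      (PySem.Int.toStr (pvOutBit g1 c p1 p2) ++ PySem.Int.toStr (pvOutBit g2 c p1 p2)) ::
        pvPairsB g1 g2 c p1 rest

theorem pvLoopA (g1 g2 : List Int) (cs : List Char) : ∀ (R1 R2 : Int) (acc : List String),
    (cs.foldl (pvStepA g1 g2) (R1, R2, acc)).2.2 = acc ++ pvPairsA g1 g2 R1 R2 (cs.map pvDig) := by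
  induction cs with
  | nil => intro R1 R2 acc; simp [pvPairsA]
  | cons b rest ih =>
      intro R1 R2 acc
      simp [List.foldl_cons, pvStepA, ih, pvPairsA]

-- B's index loop, read through the zero-padded list (0 :: 0 :: xs), equals pvPairsB 0 0 xs
theorem pvPairsB_eq_range (g1 g2 : List Int) (xs : List Int) : ∀ (p1 p2 : Int),
    pvPairsB g1 g2 p1 p2 xs = (List.range xs.length).map (fun i =>
      PySem.Int.toStr (pvOutBit g1 (xs.getD i 0) ((p2 :: p1 :: xs).getD (i + 1) 0) ((p2 :: p1 :: xs).getD i 0)) ++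
      PySem.Int.toStr (pvOutBit g2 (xs.getD i 0) ((p2 :: p1 :: xs).getD (i + 1) 0) ((p2 :: p1 :: xs).getD i 0))) := by
  induction xs with
  | nil => intro p1 p2; simp [pvPairsB]
  | cons c rest ih =>
      intro p1 p2
      simp only [pvPairsB, List.length_cons, List.range_succ_eq_map, List.map_cons, List.map_map]
      congr 1
      rw [ih c p1]
      apply List.map_congr_left
      intro i _
      simp [Function.comp]

-- the value B emits at index i, read through the zero-padded list
def pvItem (g1 g2 xs : List Int) (i : Nat) : String :=
  PySem.Int.toStr (pvOutBit g1 (xs.getD i 0) ((0 :: 0 :: xs).getD (i + 1) 0) ((0 :: 0 :: xs).getD i 0)) ++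
  PySem.Int.toStr (pvOutBit g2 (xs.getD i 0) ((0 :: 0 :: xs).getD (i + 1) 0) ((0 :: 0 :: xs).getD i 0))

-- the B loop body equals the padded-list form (pointwise, for every index)
theorem pvStepB_item (g1 g2 xs : List Int) (i : Nat) (acc : List String) :
    pvStepB g1 g2 xs acc i = acc ++ [pvItem g1 g2 xs i] := by
  match i with
  | 0 => simp [pvStepB, pvItem]
  | 1 => simp [pvStepB, pvItem]
  | (j + 2) => simp [pvStepB, pvItem]

theorem pvLoopB (g1 g2 xs : List Int) :
    (List.range xs.length).foldl (pvStepB g1 g2 xs) [] = pvPairsB g1 g2 0 0 xs := by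
  have hfun : pvStepB g1 g2 xs = fun acc i => acc ++ [pvItem g1 g2 xs i] :=
    funext fun acc => funext fun i => pvStepB_item g1 g2 xs i acc
  rw [hfun, PySem.List.foldl_append_singleton_eq_map, List.nil_append, pvPairsB_eq_range]
  simp [pvItem]

-- "".join flattens
theorem pvIntercalate_nil {α : Type} (l : List (List α)) : ([] : List α).intercalate l = l.flatten := by
  induction l with
  | nil => rfl
  | cons x rest ih =>
      cases rest with
      | nil => simp [List.intercalate]
      | cons y t =>
          simp only [List.intercalate, List.intersperse] at *
          simp_all [List.flatten]

theorem pvJoin_eq (ss ts : List String)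
    (h : (ss.map String.toList).flatten = (ts.map String.toList).flatten) :
    PySem.Str.join "" ss = PySem.Str.join "" ts := by
  apply String.toList_inj.mp
  rw [PySem.Str.toList_join, PySem.Str.toList_join]
  simpa [PySem.Chars.join, pvIntercalate_nil] using h

theorem pvFlattenAB (g1 g2 : List Int) (cs : List Int) : ∀ (p1 p2 : Int),
    ((pvPairsA g1 g2 p1 p2 cs).map String.toList).flatten = ((pvPairsB g1 g2 p1 p2 cs).map String.toList).flatten := by
  induction cs with
  | nil => intro p1 p2; rfl
  | cons c rest ih =>
      intro p1 p2
      simp [pvPairsA, pvPairsB, String.toList_append, ih]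

-- ===== VERDICT (by name: the statement is the Claim_ definition above) =====
theorem convolutional_encode_spec : Claim_equal_convolutional_encode := by
  intro bits poly1 poly2 _ _
  unfold Spec_convolutional_encode convolutional_encode convolutional_encode_alt
  apply pvJoin_eq
  rw [pvLoopA, List.nil_append, pvLoopB]
  exact pvFlattenAB _ _ _ 0 0
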